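-- pv_equiv track=rewrite | github.com/SAGE-Project/SAGE-GNN | src/trainRGCN.py | count_matches_and_diffs
-- ===== SOURCE A (Python) =====
-- def count_matches_and_diffs(list1, list2):
--     # Ensure the lists have the same length
--     if len(list1) != len(list2):
--         raise ValueError("Lists must have the same length")
--
--     # Initialize counters
--     matches = 0
--     diffs = 0
--
--     # Iterate through the lists
--     for i in range(len(list1)):
--         if list1[i] == 1 and list2[i] == 1:
--             matches += 1
--         elif list1[i] != list2[i]:
--             diffs += 1
--
--     return matches, diffs
-- ===== SOURCE B (Python) =====
-- def count_matches_and_diffs(list1, list2):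
--     # Ensure the lists have the same length
--     if len(list1) != len(list2):
--         raise ValueError("Lists must have the same length")
--
--     # Frequency table of the paired values, built in one pass
--     freq = {}
--     for pair in zip(list1, list2):
--         freq[pair] = freq.get(pair, 0) + 1
--
--     # Aggregate over the distinct pairs instead of the original indices
--     matches = freq.get((1, 1), 0)
--     diffs = sum(n for (a, b), n in freq.items() if a != b)
--     return matches, diffs
-- ===== Notes on version B (the rewrite author's own statement) =====
-- stated objective: alternative
-- what changed: Replaces the fused index loop with a table-first strategy: one pass builds a frequency table of the zipped value pairs, then matches is the (1,1) bucket and diffs is the sum of counts over distinct pairs whose components differ.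
import Mathlib
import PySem

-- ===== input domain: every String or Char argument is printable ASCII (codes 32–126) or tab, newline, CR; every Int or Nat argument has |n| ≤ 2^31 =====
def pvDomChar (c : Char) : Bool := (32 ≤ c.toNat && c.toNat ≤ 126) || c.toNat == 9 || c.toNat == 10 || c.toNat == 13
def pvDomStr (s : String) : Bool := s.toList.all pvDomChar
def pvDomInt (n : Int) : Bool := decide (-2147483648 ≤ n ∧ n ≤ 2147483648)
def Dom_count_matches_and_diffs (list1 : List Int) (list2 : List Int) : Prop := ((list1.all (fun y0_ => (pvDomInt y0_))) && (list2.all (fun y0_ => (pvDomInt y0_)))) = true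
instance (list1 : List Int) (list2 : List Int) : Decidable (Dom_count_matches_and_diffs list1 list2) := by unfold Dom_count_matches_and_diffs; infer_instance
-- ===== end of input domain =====

-- B replaces A's fused index loop by a frequency table of the zipped pairs, then aggregates over distinct pairs (alternative decomposition, same cost).


-- ===== PORT A =====
def count_matches_and_diffs (list1 : List Int) (list2 : List Int) : Int × Int :=
  (PySem.List.pyRange 0 (list1.length : Int) 1).foldl
    (fun mc i =>
      if PySem.List.pyGetD list1 i 0 = 1 ∧ PySem.List.pyGetD list2 i 0 = 1 then (mc.1 + 1, mc.2)
      else if PySem.List.pyGetD list1 i 0 ≠ PySem.List.pyGetD list2 i 0 then (mc.1, mc.2 + 1)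
      else mc)
    (0, 0)

-- ===== PORT B =====
def count_matches_and_diffs_alt (list1 : List Int) (list2 : List Int) : Int × Int :=
  let freq : PySem.Dict (Int × Int) Int :=
    (list1.zip list2).foldl (fun d p => d.insert p (d.getD p 0 + 1)) PySem.Dict.empty
  let matchCnt := freq.getD (1, 1) 0
  let diffs := (freq.items.filter (fun it => it.1.1 ≠ it.1.2)).foldl (fun s it => s + it.2) 0
  (matchCnt, diffs)

-- ===== PRECONDITION & SPEC =====
-- A raises ValueError when the lengths differ; those inputs are excluded.
def Pre_count_matches_and_diffs (list1 : List Int) (list2 : List Int) : Prop :=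
  list1.length = list2.length
instance (list1 : List Int) (list2 : List Int) : Decidable (Pre_count_matches_and_diffs list1 list2) := by unfold Pre_count_matches_and_diffs; infer_instance
def pvWitness_count_matches_and_diffs : List Int × List Int := ([1, 2, 1], [1, 3, 1])

def Spec_count_matches_and_diffs (list1 : List Int) (list2 : List Int) (out : Int × Int) : Prop := out = count_matches_and_diffs_alt list1 list2
instance (list1 : List Int) (list2 : List Int) (out : Int × Int) : Decidable (Spec_count_matches_and_diffs list1 list2 out) := by unfold Spec_count_matches_and_diffs; infer_instance

-- ===== CLAIM (what is proved, stated in full; the proofs are below) =====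
def Claim_equal_count_matches_and_diffs : Prop := ∀ (list1 : List Int) (list2 : List Int), Dom_count_matches_and_diffs list1 list2 → Pre_count_matches_and_diffs list1 list2 → Spec_count_matches_and_diffs list1 list2 (count_matches_and_diffs list1 list2)

-- ===== LEMMAS AND PROOFS =====

-- A's index loop, read through the zipped list: one step of A's body on the pair zs[i].
theorem A_foldl_closed (zs : List (Int × Int)) (m d : Int) :
    zs.foldl
      (fun mc p =>
        if p.1 = 1 ∧ p.2 = 1 then (mc.1 + 1, mc.2)
        else if p.1 ≠ p.2 then (mc.1, mc.2 + 1)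
        else mc)
      (m, d)
    = (m + (zs.countP (fun p => decide (p.1 = 1 ∧ p.2 = 1)) : Int),
       d + (zs.countP (fun p => decide (p.1 ≠ p.2)) : Int)) := by
  induction zs generalizing m d with
  | nil => simp
  | cons p zs ih =>
    rw [List.foldl_cons]
    by_cases h1 : p.1 = 1 ∧ p.2 = 1
    · rw [if_pos h1, ih]
      simp [h1.1, h1.2, Prod.ext_iff]
      omega
    · rw [if_neg h1]
      by_cases h2 : p.1 ≠ p.2
      · rw [if_pos h2, ih]
        simp [h1, h2, Prod.ext_iff]
        omega
      · rw [if_neg h2, ih]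
        simp [h1, h2]

-- Sum of the multiplicities of the distinct differing pairs equals the plain differing count.
theorem sum_count_dedup_filter (zs : List (Int × Int)) (p : (Int × Int) → Bool) :
    (((PySem.List.dedup zs).filter p).map (fun k => (zs.count k : Int))).sum
      = (zs.countP p : Int) := by
  have hperm : (PySem.List.dedup zs).Perm zs.dedup := by
    apply (List.perm_ext_iff_of_nodup (PySem.List.nodup_dedup zs) zs.nodup_dedup).2
    intro x
    simp [List.mem_dedup]
  have h1 : (((PySem.List.dedup zs).filter p).map (fun k => (zs.count k : Int))).Perm
      (((zs.dedup).filter p).map (fun k => (zs.count k : Int))) :=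
    ((hperm.filter p).map _)
  rw [List.Perm.sum_eq h1]
  have cast_sum : ∀ (l : List (Int × Int)),
      (l.map (fun k => ((zs.count k : Int)))).sum = ((l.map (fun k => zs.count k)).sum : Int) := by
    intro l
    induction l with
    | nil => simp
    | cons a t ih => simp [ih]
  rw [cast_sum]
  have hcnt : ∀ k : Int × Int,
      (@List.count (Int × Int) instBEqProd k zs) = (@List.count (Int × Int) instBEqOfDecidableEq k zs) := by
    intro k
    rw [@List.count_eq_countP' _ instBEqProd, @List.count_eq_countP' _ instBEqOfDecidableEq]
    apply List.countP_congr
    intro a _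
    simp
  simp only [hcnt]
  exact_mod_cast List.sum_map_count_dedup_filter_eq_countP p zs

-- count (1,1) is the matches-count predicate
theorem count_one_one (zs : List (Int × Int)) :
    zs.count (1, 1) = zs.countP (fun p => decide (p.1 = 1 ∧ p.2 = 1)) := by
  rw [List.count_eq_countP']
  apply List.countP_congr
  intro p _
  constructor <;> intro h
  · simp at h; simp [Prod.ext_iff] at h ⊢; omega
  · simp at h ⊢; exact Prod.ext_iff.2 (by simp [h.1, h.2])

-- B's table-then-aggregate computation, in closed form over the zipped list.
theorem alt_closed (l1 l2 : List Int) :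
    count_matches_and_diffs_alt l1 l2
      = (((l1.zip l2).countP (fun p => decide (p.1 = 1 ∧ p.2 = 1)) : Int),
         ((l1.zip l2).countP (fun p => decide (p.1 ≠ p.2)) : Int)) := by
  unfold count_matches_and_diffs_alt
  rw [PySem.Dict.foldl_insert_getD_add_one_eq_counter]
  simp only [PySem.Dict.getD_counter, PySem.Dict.items_counter, ← PySem.List.dedup_eq_ofList,
    List.filter_map, PySem.List.foldl_add, List.map_map]
  have hc : ((fun it : (Int × Int) × Int => it.2) ∘ fun k : Int × Int => (k, (List.count k (l1.zip l2) : Int)))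
      = fun k : Int × Int => (List.count k (l1.zip l2) : Int) := rfl
  have hp : ((fun it : (Int × Int) × Int => decide (it.1.1 ≠ it.1.2)) ∘ fun k : Int × Int => (k, (List.count k (l1.zip l2) : Int)))
      = fun k : Int × Int => decide (k.1 ≠ k.2) := rfl
  rw [hc, hp, sum_count_dedup_filter, count_one_one]
  simp

theorem count_matches_and_diffs_spec : Claim_equal_count_matches_and_diffs := by
  intro l1 l2 _ hpre
  have hpre' : l1.length = l2.length := hpre
  unfold Spec_count_matches_and_diffs count_matches_and_diffs
  have hlen : (l1.zip l2).length = l1.length := by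
    rw [List.length_zip]; omega
  have key : (PySem.List.pyRange 0 (l1.length : Int) 1).foldl
      (fun (mc : Int × Int) i =>
        if PySem.List.pyGetD l1 i 0 = 1 ∧ PySem.List.pyGetD l2 i 0 = 1 then (mc.1 + 1, mc.2)
        else if PySem.List.pyGetD l1 i 0 ≠ PySem.List.pyGetD l2 i 0 then (mc.1, mc.2 + 1)
        else mc) (0, 0)
    = (PySem.List.pyRange 0 (l1.length : Int) 1).foldl
      (fun (mc : Int × Int) i =>
        (fun (mc : Int × Int) (p : Int × Int) =>
          if p.1 = 1 ∧ p.2 = 1 then (mc.1 + 1, mc.2)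
          else if p.1 ≠ p.2 then (mc.1, mc.2 + 1)
          else mc) mc (PySem.List.pyGetD (l1.zip l2) i (0, 0))) (0, 0) := by
    apply PySem.List.foldl_congr_mem
    intro mc i hi
    rw [PySem.List.mem_pyRange_one] at hi
    obtain ⟨k, rfl⟩ : ∃ k : Nat, i = (k : Int) := ⟨i.toNat, (Int.toNat_of_nonneg hi.1).symm⟩
    have hk : k < l1.length := by exact_mod_cast hi.2
    have e1 : PySem.List.pyGetD (l1.zip l2) (k : Int) (0, 0)
        = (PySem.List.pyGetD l1 (k : Int) 0, PySem.List.pyGetD l2 (k : Int) 0) := by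
      rw [PySem.List.pyGetD_natCast, PySem.List.pyGetD_natCast, PySem.List.pyGetD_natCast]
      rw [List.getD_eq_getElem _ _ (by omega : k < (l1.zip l2).length),
          List.getD_eq_getElem _ _ hk,
          List.getD_eq_getElem _ _ (by omega : k < l2.length)]
      exact List.getElem_zip
    rw [e1]
  rw [key]
  rw [show (l1.length : Int) = ((l1.zip l2).length : Int) by rw [hlen]]
  rw [PySem.List.foldl_pyRange_zero_pyGetD' (l1.zip l2) ((0 : Int), (0 : Int))
    (fun (mc : Int × Int) (p : Int × Int) =>
      if p.1 = 1 ∧ p.2 = 1 then (mc.1 + 1, mc.2)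
      else if p.1 ≠ p.2 then (mc.1, mc.2 + 1)
      else mc) ((0 : Int), (0 : Int))]
  rw [A_foldl_closed, alt_closed]
  simp
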